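-- pv_equiv track=rewrite | github.com/sys-intelligence/system-intelligence-benchmark | benchmarks/sysmobench/sysmobench_core/tla_eval/evaluation/consistency/alloy_trace_validation.py | _remove_run_commands
-- ===== SOURCE A (Python) =====
-- def _remove_run_commands(spec_content: str) -> str:
--     """Remove all run commands (with or without braces) from the spec."""
--     cleaned_lines = []
--     skip_block = False
--     brace_balance = 0
--
--     for line in spec_content.splitlines():
--         stripped = line.lstrip().lower()
--         if stripped.startswith("run "):
--             brace_balance = line.count("{") - line.count("}")
--             skip_block = brace_balance > 0
--             continue
--
--         if skip_block:
--             brace_balance += line.count("{") - line.count("}")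
--             if brace_balance <= 0:
--                 skip_block = False
--             continue
--
--         cleaned_lines.append(line)
--
--     return "\n".join(cleaned_lines)
-- ===== SOURCE B (Python) =====
-- def _after_block(bal, chunk):
--     """Suffix of chunk left after the braces opened with balance bal are closed."""
--     if bal <= 0:
--         return chunk
--     total = bal
--     for k, line in enumerate(chunk):
--         total += line.count("{") - line.count("}")
--         if total <= 0:
--             return chunk[k + 1:]
--     return []
--
--
-- def _remove_run_commands(spec_content: str) -> str:
--     """Remove all run commands (with or without braces) from the spec."""
--     # Stage 1: split the lines into a head (before any run line) and
--     # run-delimited groups (header run line, body of non-run lines).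
--     head = []
--     groups = []
--     for line in spec_content.splitlines():
--         if line.lstrip().lower().startswith("run "):
--             groups.append((line, []))
--         elif groups:
--             groups[-1][1].append(line)
--         else:
--             head.append(line)
--     # Stage 2: from each group keep only the suffix after the header's block.
--     kept = head
--     for header, body in groups:
--         kept = kept + _after_block(header.count("{") - header.count("}"), body)
--     return "\n".join(kept)
-- ===== Notes on version B (the rewrite author's own statement) =====
-- stated objective: alternative
-- what changed: B is a two-stage algorithm: first it partitions the lines into a head plus run-line-delimited groups (header run line, run-free body), then it keeps from each group only the suffix of its body that follows the header's closed brace block; A is a single stateful pass with persistent skip/balance flags.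
import Mathlib
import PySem

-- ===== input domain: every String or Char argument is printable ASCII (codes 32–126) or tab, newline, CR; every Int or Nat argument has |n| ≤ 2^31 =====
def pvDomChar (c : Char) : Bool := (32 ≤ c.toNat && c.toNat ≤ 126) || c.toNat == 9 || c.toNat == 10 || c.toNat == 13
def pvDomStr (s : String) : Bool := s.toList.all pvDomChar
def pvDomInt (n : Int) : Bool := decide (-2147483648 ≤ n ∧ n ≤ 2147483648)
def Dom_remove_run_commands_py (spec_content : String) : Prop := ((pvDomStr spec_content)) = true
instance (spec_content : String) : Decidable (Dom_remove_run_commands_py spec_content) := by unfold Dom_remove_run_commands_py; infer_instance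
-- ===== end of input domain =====

-- B replaces A's single stateful pass by a two-stage algorithm (partition into
-- run-delimited groups, then keep each body's suffix after the header's block);
-- alternative decomposition, same cost.

-- ===== PORT A =====
-- loop body of A's for-loop; state = (cleaned_lines, skip_block, brace_balance)
def pvStepA (st : List String × Bool × Int) (line : String) : List String × Bool × Int :=
  let stripped := PySem.Str.lower (PySem.Str.lstrip line)
  if PySem.Str.startswith stripped "run " then
    let b : Int := (PySem.Str.count line "{" : Int) - (PySem.Str.count line "}" : Int)
    (st.1, decide (b > 0), b)
  else if st.2.1 then
    let b : Int := st.2.2 + ((PySem.Str.count line "{" : Int) - (PySem.Str.count line "}" : Int))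
    if b ≤ 0 then (st.1, false, b) else (st.1, true, b)
  else
    (st.1 ++ [line], st.2.1, st.2.2)

def remove_run_commands_py (spec_content : String) : String :=
  PySem.Str.join "\n" ((PySem.Str.splitlines spec_content).foldl pvStepA ([], false, 0)).1

-- ===== PORT B =====
def pvIsRun (line : String) : Bool :=
  PySem.Str.startswith (PySem.Str.lower (PySem.Str.lstrip line)) "run "

def pvDelta (line : String) : Int :=
  (PySem.Str.count line "{" : Int) - (PySem.Str.count line "}" : Int)

-- Source B's _after_block: the for-loop with running total, returning chunk[k+1:]
def pvAfterGo (total : Int) : List String → List String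
  | [] => []
  | l :: rest => if total + pvDelta l ≤ 0 then rest else pvAfterGo (total + pvDelta l) rest

def pvAfter (bal : Int) (chunk : List String) : List String :=
  if bal ≤ 0 then chunk else pvAfterGo bal chunk

-- Source B's groups[-1][1].append(line)
def pvAppendLast (gs : List (String × List String)) (line : String) : List (String × List String) :=
  match gs with
  | [] => []
  | [g] => [(g.1, g.2 ++ [line])]
  | g :: g2 :: rest => g :: pvAppendLast (g2 :: rest) line

-- stage-1 loop body; state = (head, groups)
def pvSplitStep (st : List String × List (String × List String)) (line : String) :
    List String × List (String × List String) :=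
  if pvIsRun line then (st.1, st.2 ++ [(line, [])])
  else if st.2.isEmpty then (st.1 ++ [line], st.2)
  else (st.1, pvAppendLast st.2 line)

def remove_run_commands_py_alt (spec_content : String) : String :=
  let st := (PySem.Str.splitlines spec_content).foldl pvSplitStep ([], [])
  PySem.Str.join "\n"
    (st.2.foldl (fun kept g => kept ++ pvAfter (pvDelta g.1) g.2) st.1)

-- ===== PRECONDITION & SPEC =====
def Spec_remove_run_commands_py (spec_content : String) (out : String) : Prop := out = remove_run_commands_py_alt spec_content
instance (spec_content : String) (out : String) : Decidable (Spec_remove_run_commands_py spec_content out) := by unfold Spec_remove_run_commands_py; infer_instance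

-- ===== CLAIM (what is proved, stated in full; the proofs are below) =====
def Claim_equal_remove_run_commands_py : Prop := ∀ (spec_content : String), Dom_remove_run_commands_py spec_content → Spec_remove_run_commands_py spec_content (remove_run_commands_py spec_content)

-- ===== LEMMAS AND PROOFS =====

-- Proof-only recursive semantics of A's pass: skip-loop and main loop.
def pvConsume (bal : Int) : List String → List String
  | [] => []
  | l :: rest =>
    if bal ≤ 0 then l :: rest
    else pvConsume (if pvIsRun l then pvDelta l else bal + pvDelta l) rest

theorem pvConsume_length_le (bal : Int) (ls : List String) :
    (pvConsume bal ls).length ≤ ls.length := by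
  induction ls generalizing bal with
  | nil => simp [pvConsume]
  | cons l rest ih =>
    simp only [pvConsume]
    split
    · simp
    · exact Nat.le_succ_of_le (ih _)

def pvGo : List String → List String
  | [] => []
  | l :: rest =>
    if pvIsRun l then pvGo (pvConsume (pvDelta l) rest)
    else l :: pvGo rest
termination_by ls => ls.length
decreasing_by
  · exact Nat.lt_succ_of_le (pvConsume_length_le _ _)
  · simp

theorem pvConsume_nonpos (bal : Int) (ls : List String) (h : bal ≤ 0) :
    pvConsume bal ls = ls := by
  cases ls with
  | nil => rfl
  | cons l rest => simp [pvConsume, h]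

-- A's fold state vs pvGo/pvConsume.
theorem pv_main (ls : List String) :
    (∀ acc bal, (ls.foldl pvStepA (acc, false, bal)).1 = acc ++ pvGo ls) ∧
    (∀ acc bal, 0 < bal → (ls.foldl pvStepA (acc, true, bal)).1 = acc ++ pvGo (pvConsume bal ls)) := by
  induction ls with
  | nil => constructor <;> intros <;> simp [pvGo, pvConsume]
  | cons l rest ih =>
    constructor
    · intro acc bal
      rw [List.foldl_cons]
      by_cases hrun : pvIsRun l
      · have hstep : pvStepA (acc, false, bal) l = (acc, decide (pvDelta l > 0), pvDelta l) := by
          simp [pvStepA, pvIsRun, pvDelta] at hrun ⊢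
          simp [hrun]
        rw [hstep, pvGo]
        rw [if_pos hrun]
        by_cases hd : pvDelta l > 0
        · simp only [hd, decide_true]
          exact ih.2 acc (pvDelta l) hd
        · simp only [hd, decide_false]
          rw [pvConsume_nonpos _ _ (by omega)]
          exact ih.1 acc (pvDelta l)
      · have hstep : pvStepA (acc, false, bal) l = (acc ++ [l], false, bal) := by
          simp [pvStepA, pvIsRun] at hrun ⊢
          simp [hrun]
        rw [hstep, pvGo]
        rw [if_neg hrun]
        rw [ih.1 (acc ++ [l]) bal]
        simp
    · intro acc bal hbal
      rw [List.foldl_cons]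
      have hcons : pvConsume bal (l :: rest)
          = pvConsume (if pvIsRun l then pvDelta l else bal + pvDelta l) rest := by
        simp [pvConsume, show ¬ bal ≤ 0 by omega]
      by_cases hrun : pvIsRun l
      · have hstep : pvStepA (acc, true, bal) l = (acc, decide (pvDelta l > 0), pvDelta l) := by
          simp [pvStepA, pvIsRun, pvDelta] at hrun ⊢
          simp [hrun]
        rw [hstep, hcons]
        rw [if_pos hrun]
        by_cases hd : pvDelta l > 0
        · simp only [hd, decide_true]
          exact ih.2 acc (pvDelta l) hd
        · simp only [hd, decide_false]
          rw [pvConsume_nonpos _ _ (by omega)]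
          exact ih.1 acc (pvDelta l)
      · have hb : (pvStepA (acc, true, bal) l)
            = if bal + pvDelta l ≤ 0 then (acc, false, bal + pvDelta l)
              else (acc, true, bal + pvDelta l) := by
          simp [pvStepA, pvIsRun, pvDelta] at hrun ⊢
          simp [hrun]
        rw [hb, hcons]
        rw [if_neg hrun]
        by_cases hle : bal + pvDelta l ≤ 0
        · simp only [hle, if_true]
          rw [pvConsume_nonpos _ _ hle]
          exact ih.1 acc (bal + pvDelta l)
        · simp only [hle, if_false]
          exact ih.2 acc (bal + pvDelta l) (by omega)

-- Proof-only clean recursive form of stage 1.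
def pvSplitR : List String → List String × List (String × List String)
  | [] => ([], [])
  | l :: rest =>
    let r := pvSplitR rest
    if pvIsRun l then ([], (l, r.1) :: r.2) else (l :: r.1, r.2)

theorem pvAppendLast_snoc (gs : List (String × List String)) (hd : String) (b : List String) (line : String) :
    pvAppendLast (gs ++ [(hd, b)]) line = gs ++ [(hd, b ++ [line])] := by
  induction gs with
  | nil => rfl
  | cons g gs ih =>
    cases gs with
    | nil => simp [pvAppendLast]
    | cons g2 gs' => simpa [pvAppendLast] using ih

-- Stage-1 fold equals pvSplitR.
theorem pv_split (ls : List String) :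
    (∀ h, ls.foldl pvSplitStep (h, []) = (h ++ (pvSplitR ls).1, (pvSplitR ls).2)) ∧
    (∀ h gs hd b, ls.foldl pvSplitStep (h, gs ++ [(hd, b)])
        = (h, (gs ++ [(hd, b ++ (pvSplitR ls).1)]) ++ (pvSplitR ls).2)) := by
  induction ls with
  | nil => constructor <;> intros <;> simp [pvSplitR]
  | cons l rest ih =>
    constructor
    · intro h
      rw [List.foldl_cons]
      by_cases hrun : pvIsRun l
      · have hstep : pvSplitStep (h, []) l = (h, [] ++ [(l, [])]) := by
          simp [pvSplitStep, hrun]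
        rw [hstep, ih.2 h [] l []]
        simp [pvSplitR, hrun]
      · have hstep : pvSplitStep (h, []) l = (h ++ [l], []) := by
          simp [pvSplitStep, hrun]
        rw [hstep, ih.1 (h ++ [l])]
        simp [pvSplitR, hrun]
    · intro h gs hd b
      rw [List.foldl_cons]
      by_cases hrun : pvIsRun l
      · have hstep : pvSplitStep (h, gs ++ [(hd, b)]) l
            = (h, (gs ++ [(hd, b)]) ++ [(l, [])]) := by
          simp [pvSplitStep, hrun]
        rw [hstep, ih.2 h (gs ++ [(hd, b)]) l []]
        simp [pvSplitR, hrun]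
      · have hne : ((gs ++ [(hd, b)] : List (String × List String)).isEmpty) = false := by
          simp
        have hstep : pvSplitStep (h, gs ++ [(hd, b)]) l
            = (h, gs ++ [(hd, b ++ [l])]) := by
          simp [pvSplitStep, hrun, hne, pvAppendLast_snoc]
        rw [hstep, ih.2 h gs hd (b ++ [l])]
        simp [pvSplitR, hrun]

def pvProc (gs : List (String × List String)) : List String :=
  gs.flatMap (fun g => pvAfter (pvDelta g.1) g.2)

theorem pvAfter_nil (bal : Int) : pvAfter bal [] = [] := by
  unfold pvAfter pvAfterGo
  split <;> rfl

theorem pvAfter_cons_pos (bal : Int) (l : String) (rest : List String) (h : 0 < bal) :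
    pvAfter bal (l :: rest) = pvAfter (bal + pvDelta l) rest := by
  simp only [pvAfter, pvAfterGo, show ¬ bal ≤ 0 by omega, if_false]

-- pvGo/pvConsume vs stage 1 + stage 2.
theorem pv_go_split (ls : List String) :
    (pvGo ls = (pvSplitR ls).1 ++ pvProc (pvSplitR ls).2) ∧
    (∀ bal, pvGo (pvConsume bal ls) = pvAfter bal (pvSplitR ls).1 ++ pvProc (pvSplitR ls).2) := by
  induction ls with
  | nil =>
    refine ⟨by simp [pvGo, pvSplitR, pvProc], ?_⟩
    intro bal
    simp [pvConsume, pvGo, pvSplitR, pvProc, pvAfter_nil]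
  | cons l rest ih =>
    by_cases hrun : pvIsRun l
    · have hsplit : pvSplitR (l :: rest) = ([], (l, (pvSplitR rest).1) :: (pvSplitR rest).2) := by
        simp [pvSplitR, hrun]
      have hgo : pvGo (l :: rest) = pvGo (pvConsume (pvDelta l) rest) := by
        rw [pvGo, if_pos hrun]
      constructor
      · rw [hgo, hsplit, ih.2 (pvDelta l)]
        simp [pvProc]
      · intro bal
        by_cases hle : bal ≤ 0
        · rw [pvConsume_nonpos _ _ hle, hgo, hsplit, ih.2 (pvDelta l)]
          simp [pvAfter, hle, pvProc]
        · have : pvConsume bal (l :: rest) = pvConsume (pvDelta l) rest := by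
            simp [pvConsume, hle, hrun]
          rw [this, ih.2 (pvDelta l), hsplit]
          simp [pvAfter_nil, pvProc]
    · have hsplit : pvSplitR (l :: rest) = (l :: (pvSplitR rest).1, (pvSplitR rest).2) := by
        simp [pvSplitR, hrun]
      have hgo : pvGo (l :: rest) = l :: pvGo rest := by
        rw [pvGo, if_neg hrun]
      constructor
      · rw [hgo, hsplit, ih.1]
        simp
      · intro bal
        by_cases hle : bal ≤ 0
        · rw [pvConsume_nonpos _ _ hle, hgo, hsplit, ih.1]
          simp [pvAfter, hle]
        · have : pvConsume bal (l :: rest) = pvConsume (bal + pvDelta l) rest := by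
            simp [pvConsume, hle, hrun]
          rw [this, ih.2 (bal + pvDelta l), hsplit,
            pvAfter_cons_pos bal l (pvSplitR rest).1 (by omega)]

-- ===== VERDICT (by name: the statement is the Claim_ definition above) =====
theorem remove_run_commands_py_spec : Claim_equal_remove_run_commands_py := by
  intro s _
  unfold Spec_remove_run_commands_py remove_run_commands_py remove_run_commands_py_alt
  rw [(pv_main (PySem.Str.splitlines s)).1 [] 0,
    (pv_split (PySem.Str.splitlines s)).1 [],
    (pv_go_split (PySem.Str.splitlines s)).1]
  simp [PySem.List.foldl_append_eq_flatMap, pvProc, List.flatMap_def]
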